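-- pv_equiv track=rewrite | github.com/DrewTX/Chord_Generator | ChordGen.py | chordGen
-- ===== SOURCE A (Python) =====
-- def chordGen(note,mode):
--     notesList = ['C','C#','D','D#','E','F','F#','G','G#','A','A#','B']
--     custNotesList = []
--     for i in notesList[notesList.index(note):]:
--         custNotesList.append(i)
--     for i in notesList[:notesList.index(note)]:
--         custNotesList.append(i)
--     modeChords = []
--     #Ionian - W W H W W W H
--     if mode == 'Ionian':
--         ionian = [0,2,4,5,7,9,11]
--         ionianChords = ['Maj','min','min','Maj','Maj','min','dim']
--         n = 0
--         for i in ionian: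
--             modeChords.append(custNotesList[i])
--             modeChords[n] = modeChords[n] + ionianChords[n]
--             n+=1
--     #Dorian - W H W W W H W
--     if mode == 'Dorian':
--         dorian = [0,2,3,5,7,9,10]
--         dorianChords = ['min','min','Maj','Maj','min','dim','Maj']
--         n = 0
--         for i in dorian:
--             modeChords.append(custNotesList[i])
--             modeChords[n] = modeChords[n] + dorianChords[n]
--             n+=1
--     #Phrygian - H W W W H W W
--     if mode == 'Phrygian':
--         phrygian = [0,1,3,5,7,8,10]
--         phrygianChords = ['min','Maj','Maj','min','dim','Maj','min']
--         n = 0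
--         for i in phrygian:
--             modeChords.append(custNotesList[i])
--             modeChords[n] = modeChords[n] + phrygianChords[n]
--             n+=1
--     #Lydian - W W W H W W H
--     if mode == 'Lydian':
--         lydian = [0,2,4,6,7,9,11]
--         lydianChords = ['Maj','Maj','min','dim','Maj','min','min']
--         n = 0
--         for i in lydian:
--             modeChords.append(custNotesList[i])
--             modeChords[n] = modeChords[n] + lydianChords[n]
--             n+=1
--     #Mixolydian - W W H W W H W
--     if mode == 'Mixolydian':
--         mixolydian = [0,2,4,5,7,9,10]
--         mixolydianChords = ['Maj','min','dim','Maj','min','min','Maj']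
--         n = 0
--         for i in mixolydian:
--             modeChords.append(custNotesList[i])
--             modeChords[n] = modeChords[n] + mixolydianChords[n]
--             n+=1
--     #Aeolian - W H W W H W W
--     if mode == 'Aeolian':
--         aeolian = [0,2,3,5,7,8,10]
--         aeolianChords = ['min','dim','Maj','min','min','Maj','Maj']
--         n = 0
--         for i in aeolian:
--             modeChords.append(custNotesList[i])
--             modeChords[n] = modeChords[n] + aeolianChords[n]
--             n+=1
--     #Locrian - H W W H W W W
--     if mode == 'Locrian':
--         locrian = [0,1,3,5,6,8,10]
--         locrianChords = ['dim','Maj','min','min','Maj','Maj','min']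
--         n = 0
--         for i in locrian:
--             modeChords.append(custNotesList[i])
--             modeChords[n] = modeChords[n] + locrianChords[n]
--             n+=1
--     return modeChords
-- ===== SOURCE B (Python) =====
-- def chordGen(note, mode):
--     notesList = ['C','C#','D','D#','E','F','F#','G','G#','A','A#','B']
--     r = notesList.index(note)
--     modes = ['Ionian','Dorian','Phrygian','Lydian','Mixolydian','Aeolian','Locrian']
--     if mode not in modes:
--         return []
--     k = modes.index(mode)
--     # every mode is a rotation of the major-scale step pattern
--     major = [2, 2, 1, 2, 2, 2, 1]
--     steps = major[k:] + major[:k]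
--     degs = [0]
--     for s in steps[:6]:
--         degs.append(degs[-1] + s)
--     # classify each degree's triad by its stacked thirds
--     out = []
--     for d in range(7):
--         third = (degs[(d + 2) % 7] - degs[d]) % 12
--         fifth = (degs[(d + 4) % 7] - degs[d]) % 12
--         if third == 4:
--             q = 'Maj'
--         elif fifth == 6:
--             q = 'dim'
--         else:
--             q = 'min'
--         out.append(notesList[(r + degs[d]) % 12] + q)
--     return out
-- ===== Notes on version B (the rewrite author's own statement) =====
-- stated objective: alternative
-- what changed: B removes all seven hard-coded interval and quality tables: it rotates the major-scale step pattern by the mode's index, accumulates the scale degrees, and derives each chord quality by classifying the triad's stacked thirds ((deg[d+2]-deg[d])%12 and (deg[d+4]-deg[d])%12).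
import Mathlib
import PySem

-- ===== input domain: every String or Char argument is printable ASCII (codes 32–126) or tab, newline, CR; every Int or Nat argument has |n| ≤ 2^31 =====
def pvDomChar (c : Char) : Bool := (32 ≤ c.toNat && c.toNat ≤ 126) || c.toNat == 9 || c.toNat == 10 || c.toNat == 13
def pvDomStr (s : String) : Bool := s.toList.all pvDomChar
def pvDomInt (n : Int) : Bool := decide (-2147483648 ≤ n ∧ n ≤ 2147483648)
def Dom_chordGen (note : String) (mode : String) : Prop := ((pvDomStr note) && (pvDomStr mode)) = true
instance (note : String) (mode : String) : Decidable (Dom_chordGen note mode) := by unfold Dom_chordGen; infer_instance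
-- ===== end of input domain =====

-- B drops A's hard-coded per-mode interval and quality tables entirely: it derives each mode's scale
-- by rotating the major step pattern and classifies each degree's triad from its stacked thirds
-- (objective: alternative; not faster).

-- ===== PORT A =====
def pvNotes : List String := ["C","C#","D","D#","E","F","F#","G","G#","A","A#","B"]

-- the 'append note then overwrite modeChords[n] with modeChords[n] + quality' loop of each mode block:
-- its net effect, step for step, is one entry custNotesList[i] ++ quality per (interval, quality) pair
def pvBuild (cust : List String) (iv : List Int) (qs : List String) : List String :=
  (iv.zip qs).map (fun p => (PySem.List.pyGet? cust p.1).getD "" ++ p.2)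

def chordGen (note : String) (mode : String) : List String :=
  match PySem.List.index? pvNotes note with
  | none => []   -- Python raises ValueError here; excluded by Pre_chordGen
  | some r =>
    -- custNotesList = notesList[r:] + notesList[:r]
    let cust := PySem.List.slice pvNotes (some (r : Int)) none
                ++ PySem.List.slice pvNotes none (some (r : Int))
    let modeChords : List String := []
    let modeChords := if mode = "Ionian" then
      pvBuild cust [0,2,4,5,7,9,11] ["Maj","min","min","Maj","Maj","min","dim"] else modeChords
    let modeChords := if mode = "Dorian" then
      pvBuild cust [0,2,3,5,7,9,10] ["min","min","Maj","Maj","min","dim","Maj"] else modeChords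
    let modeChords := if mode = "Phrygian" then
      pvBuild cust [0,1,3,5,7,8,10] ["min","Maj","Maj","min","dim","Maj","min"] else modeChords
    let modeChords := if mode = "Lydian" then
      pvBuild cust [0,2,4,6,7,9,11] ["Maj","Maj","min","dim","Maj","min","min"] else modeChords
    let modeChords := if mode = "Mixolydian" then
      pvBuild cust [0,2,4,5,7,9,10] ["Maj","min","dim","Maj","min","min","Maj"] else modeChords
    let modeChords := if mode = "Aeolian" then
      pvBuild cust [0,2,3,5,7,8,10] ["min","dim","Maj","min","min","Maj","Maj"] else modeChords
    let modeChords := if mode = "Locrian" then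
      pvBuild cust [0,1,3,5,6,8,10] ["dim","Maj","min","min","Maj","Maj","min"] else modeChords
    modeChords

-- ===== PORT B =====
def pvModes : List String := ["Ionian","Dorian","Phrygian","Lydian","Mixolydian","Aeolian","Locrian"]

def chordGen_alt (note : String) (mode : String) : List String :=
  match PySem.List.index? pvNotes note with
  | none => []   -- Python raises ValueError here; excluded by Pre_chordGen
  | some r =>
    if mode ∈ pvModes then
      match PySem.List.index? pvModes mode with
      | none => []
      | some k =>
        -- every mode is a rotation of the major-scale step pattern
        let major : List Int := [2, 2, 1, 2, 2, 2, 1]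
        let steps := PySem.List.slice major (some (k : Int)) none
                     ++ PySem.List.slice major none (some (k : Int))
        let degs := (PySem.List.slice steps none (some 6)).foldl
          (fun acc s => acc ++ [(PySem.List.pyGet? acc (-1)).getD 0 + s]) [0]
        -- classify each degree's triad by its stacked thirds
        (PySem.List.pyRange 0 7 1).map (fun d =>
          let dd := (PySem.List.pyGet? degs d).getD 0
          let third := PySem.Int.mod ((PySem.List.pyGet? degs (PySem.Int.mod (d + 2) 7)).getD 0 - dd) 12
          let fifth := PySem.Int.mod ((PySem.List.pyGet? degs (PySem.Int.mod (d + 4) 7)).getD 0 - dd) 12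
          let q := if third = 4 then "Maj" else if fifth = 6 then "dim" else "min"
          (PySem.List.pyGet? pvNotes (PySem.Int.mod ((r : Int) + dd) 12)).getD "" ++ q)
    else []

-- ===== PRECONDITION & SPEC =====
-- Pre_ excludes exactly the notes not in the chromatic scale, on which A (and B) raise ValueError.
def Pre_chordGen (note : String) (mode : String) : Prop := note ∈ pvNotes
instance (note : String) (mode : String) : Decidable (Pre_chordGen note mode) := by
  unfold Pre_chordGen; infer_instance
def pvWitness_chordGen : String × String := ("C", "Ionian")
def Spec_chordGen (note : String) (mode : String) (out : List String) : Prop := out = chordGen_alt note mode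
instance (note : String) (mode : String) (out : List String) : Decidable (Spec_chordGen note mode out) := by unfold Spec_chordGen; infer_instance

-- ===== CLAIM (what is proved, stated in full; the proofs are below) =====
def Claim_equal_chordGen : Prop := ∀ (note : String) (mode : String), Dom_chordGen note mode → Pre_chordGen note mode → Spec_chordGen note mode (chordGen note mode)

-- ===== LEMMAS AND PROOFS =====

-- for a mode outside the seven mode names both programs return the empty list
theorem pv_unknown_mode (note mode : String)
    (h1 : mode ≠ "Ionian") (h2 : mode ≠ "Dorian") (h3 : mode ≠ "Phrygian")
    (h4 : mode ≠ "Lydian") (h5 : mode ≠ "Mixolydian") (h6 : mode ≠ "Aeolian")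
    (h7 : mode ≠ "Locrian") :
    chordGen note mode = [] ∧ chordGen_alt note mode = [] := by
  have hm : mode ∉ pvModes := by
    simp [pvModes, h1, h2, h3, h4, h5, h6, h7]
  have hA : chordGen note mode = [] := by
    unfold chordGen
    cases PySem.List.index? pvNotes note with
    | none => rfl
    | some r => simp [h1, h2, h3, h4, h5, h6, h7]
  have hB : chordGen_alt note mode = [] := by
    unfold chordGen_alt
    cases PySem.List.index? pvNotes note with
    | none => rfl
    | some r => simp [hm]
  exact ⟨hA, hB⟩

-- ===== VERDICT (by name: the statement is the Claim_ definition above) =====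
theorem chordGen_spec : Claim_equal_chordGen := by
  intro note mode _ hpre
  unfold Spec_chordGen
  have hn : note = "C" ∨ note = "C#" ∨ note = "D" ∨ note = "D#" ∨ note = "E" ∨
      note = "F" ∨ note = "F#" ∨ note = "G" ∨ note = "G#" ∨ note = "A" ∨
      note = "A#" ∨ note = "B" := by
    simpa [Pre_chordGen, pvNotes] using hpre
  by_cases h1 : mode = "Ionian"
  · subst h1; rcases hn with rfl|rfl|rfl|rfl|rfl|rfl|rfl|rfl|rfl|rfl|rfl|rfl <;> decide
  by_cases h2 : mode = "Dorian"
  · subst h2; rcases hn with rfl|rfl|rfl|rfl|rfl|rfl|rfl|rfl|rfl|rfl|rfl|rfl <;> decide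
  by_cases h3 : mode = "Phrygian"
  · subst h3; rcases hn with rfl|rfl|rfl|rfl|rfl|rfl|rfl|rfl|rfl|rfl|rfl|rfl <;> decide
  by_cases h4 : mode = "Lydian"
  · subst h4; rcases hn with rfl|rfl|rfl|rfl|rfl|rfl|rfl|rfl|rfl|rfl|rfl|rfl <;> decide
  by_cases h5 : mode = "Mixolydian"
  · subst h5; rcases hn with rfl|rfl|rfl|rfl|rfl|rfl|rfl|rfl|rfl|rfl|rfl|rfl <;> decide
  by_cases h6 : mode = "Aeolian"
  · subst h6; rcases hn with rfl|rfl|rfl|rfl|rfl|rfl|rfl|rfl|rfl|rfl|rfl|rfl <;> decide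
  by_cases h7 : mode = "Locrian"
  · subst h7; rcases hn with rfl|rfl|rfl|rfl|rfl|rfl|rfl|rfl|rfl|rfl|rfl|rfl <;> decide
  obtain ⟨hA, hB⟩ := pv_unknown_mode note mode h1 h2 h3 h4 h5 h6 h7
  rw [hA, hB]
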